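-- pv_equiv track=rewrite | github.com/joecummings/epi | ch6/6dot2.py | inc_helper
-- ===== SOURCE A (Python) =====
-- def inc_helper(lod: list, pos: int, carry: bool) -> list:
--     if pos == 0:
--         if not carry:
--             return lod
--         lod[0] += 1
--         return lod
--
--     if carry:
--         lod[pos] += 1
--         if is_ten(lod[pos]):
--             lod[pos] = 0
--             return inc_helper(lod, pos-1, True)
--         return inc_helper(lod, 0, False)
--
--     lod[pos] += 1
--     if is_ten(lod[pos]):
--         lod[pos] = 0
--         return inc_helper(lod, pos - 1, True)
--
--     return inc_helper(lod, 0, False)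
--
-- def is_ten(num: int) -> bool:
--     return num == 10
-- ===== SOURCE B (Python) =====
-- def inc_helper(lod: list, pos: int, carry: bool) -> list:
--     # Two-phase: first SCAN for the stop index (first non-9 digit, or index 0),
--     # then bulk-zero the scanned run and bump the stop digit once.
--     if pos == 0:
--         if carry:
--             lod[0] += 1
--         return lod
--     s = pos
--     while s != 0 and lod[s] == 9:
--         s -= 1
--     k = pos
--     while k != s:
--         lod[k] = 0
--         k -= 1
--     lod[s] += 1
--     return lod
-- ===== Notes on version B (the rewrite author's own statement) =====
-- stated objective: alternative
-- what changed: Replaced A's digit-by-digit carry recursion by a two-phase algorithm: a read-only scan that finds the stop index (first non-9 digit or index 0), then a bulk zeroing loop over the scanned run and a single increment at the stop index.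
import Mathlib
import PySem

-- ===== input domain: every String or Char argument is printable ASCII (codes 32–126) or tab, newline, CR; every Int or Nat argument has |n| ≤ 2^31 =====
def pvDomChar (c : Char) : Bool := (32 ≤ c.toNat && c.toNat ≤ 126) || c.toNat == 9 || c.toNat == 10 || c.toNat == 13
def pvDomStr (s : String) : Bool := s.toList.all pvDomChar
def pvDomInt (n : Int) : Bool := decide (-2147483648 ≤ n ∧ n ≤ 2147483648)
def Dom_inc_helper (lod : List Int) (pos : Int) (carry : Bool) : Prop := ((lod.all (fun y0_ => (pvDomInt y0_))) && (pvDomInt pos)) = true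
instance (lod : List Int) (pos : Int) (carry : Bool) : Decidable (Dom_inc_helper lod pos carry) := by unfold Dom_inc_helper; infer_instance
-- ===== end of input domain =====

-- B replaces A's digit-by-digit carry recursion by a two-phase algorithm (scan for the
-- stop index, then bulk-zero the run and bump once); both Pythons mutate lod in place the
-- same way on Pre_, and the equivalence proved here is about the returned list.

-- ===== PORT A =====
-- literal port of A's recursion; where Python raises IndexError (pyGet? = none) the port
-- returns lod — exactly those inputs are excluded by Pre_inc_helper.
def is_ten (num : Int) : Bool := num == 10

def inc_helper (lod : List Int) (pos : Int) (carry : Bool) : List Int :=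
  if pos = 0 then
    if !carry then lod
    else
      match PySem.List.pyGet? lod 0 with
      | none => lod  -- Python: IndexError (empty list), excluded by Pre_
      | some v => PySem.List.pySetD lod 0 (v + 1)  -- lod[0] += 1
  else if carry then
    match h : PySem.List.pyGet? lod pos with
    | none => lod  -- Python: IndexError, excluded by Pre_
    | some v =>
      let lod' := PySem.List.pySetD lod pos (v + 1)  -- lod[pos] += 1
      if is_ten (v + 1) then
        inc_helper (PySem.List.pySetD lod' pos 0) (pos - 1) true
      else
        inc_helper lod' 0 false
  else
    match h : PySem.List.pyGet? lod pos with
    | none => lod  -- Python: IndexError, excluded by Pre_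
    | some v =>
      let lod' := PySem.List.pySetD lod pos (v + 1)
      if is_ten (v + 1) then
        inc_helper (PySem.List.pySetD lod' pos 0) (pos - 1) true
      else
        inc_helper lod' 0 false
  termination_by (if pos = 0 then 0 else (pos + lod.length + 1).toNat + 1 : Nat)
  decreasing_by
  all_goals
    have hr : PySem.Raise.InRange lod.length pos := by
      by_contra hc
      rw [(PySem.List.pyGet?_eq_none_iff lod pos).mpr hc] at h
      simp at h
    unfold PySem.Raise.InRange at hr
    simp only [PySem.List.length_pySetD]
    split_ifs <;> omega

-- ===== PORT B =====
-- Source B phase 1: the scan `s = pos; while s != 0 and lod[s] == 9: s -= 1`;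
-- none = the scan's list access raises IndexError (excluded by Pre_).
def findStop (lod : List Int) (s : Int) : Option Int :=
  if s = 0 then some 0
  else
    match h : PySem.List.pyGet? lod s with
    | none => none
    | some v => if v = 9 then findStop lod (s - 1) else some s
  termination_by (s + lod.length + 1).toNat
  decreasing_by
    have hr : PySem.Raise.InRange lod.length s := by
      by_contra hc
      rw [(PySem.List.pyGet?_eq_none_iff lod s).mpr hc] at h
      simp at h
    unfold PySem.Raise.InRange at hr
    omega

-- Source B phase 2: `k = pos; while k != s: lod[k] = 0; k -= 1` (the `k ≤ s` guard only makes
-- the recursion total; every call has s ≤ k, where the guard coincides with Python's `k != s`).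
def zeroRun (lod : List Int) (k s : Int) : List Int :=
  if k ≤ s then lod
  else zeroRun (PySem.List.pySetD lod k 0) (k - 1) s
  termination_by (k - s).toNat
  decreasing_by omega

-- `lod[i] += 1` (none = IndexError, excluded by Pre_)
def bumpAt (lod : List Int) (i : Int) : List Int :=
  match PySem.List.pyGet? lod i with
  | none => lod
  | some v => PySem.List.pySetD lod i (v + 1)

def inc_helper_alt (lod : List Int) (pos : Int) (carry : Bool) : List Int :=
  if pos = 0 then
    if carry then bumpAt lod 0 else lod
  else
    match findStop lod pos with
    | none => lod  -- the scan raised IndexError in Python; excluded by Pre_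
    | some s => bumpAt (zeroRun lod pos s) s

-- ===== PRECONDITION & SPEC =====
-- Pre_ holds exactly where Python's A returns normally; it excludes only inputs where A raises
-- IndexError: pos out of range (beyond ±len), lod[0] on an empty list when carry is set, and a
-- negative pos whose whole carry descent (a run of digits 9) falls off the front of the list.
def Pre_inc_helper (lod : List Int) (pos : Int) (carry : Bool) : Prop :=
  (pos = 0 → (carry = true → lod ≠ [])) ∧
  (0 < pos → pos < lod.length) ∧
  (pos < 0 → -(lod.length : Int) ≤ pos ∧
    ∃ d ∈ lod.take ((lod.length : Int) + pos + 1).toNat, d ≠ 9)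
instance (lod : List Int) (pos : Int) (carry : Bool) : Decidable (Pre_inc_helper lod pos carry) := by unfold Pre_inc_helper; infer_instance

def pvWitness_inc_helper : List Int × Int × Bool := ([1, 9, 9], 2, true)

def Spec_inc_helper (lod : List Int) (pos : Int) (carry : Bool) (out : List Int) : Prop := out = inc_helper_alt lod pos carry
instance (lod : List Int) (pos : Int) (carry : Bool) (out : List Int) : Decidable (Spec_inc_helper lod pos carry out) := by unfold Spec_inc_helper; infer_instance

-- ===== CLAIM (what is proved, stated in full; the proofs are below) =====
def Claim_equal_inc_helper : Prop := ∀ (lod : List Int) (pos : Int) (carry : Bool), Dom_inc_helper lod pos carry → Pre_inc_helper lod pos carry → Spec_inc_helper lod pos carry (inc_helper lod pos carry)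

-- ===== LEMMAS AND PROOFS =====

-- one-step unfolding lemmas for the two ports' recursions
theorem inc_helper_zero_false (lod : List Int) : inc_helper lod 0 false = lod := by
  rw [inc_helper.eq_def]; simp

theorem inc_helper_zero_true (lod : List Int) : inc_helper lod 0 true = bumpAt lod 0 := by
  rw [inc_helper.eq_def, bumpAt]; simp

theorem inc_helper_pos (lod : List Int) (pos : Int) (carry : Bool) (hpos : pos ≠ 0) :
    inc_helper lod pos carry = (PySem.List.pyGet? lod pos).elim lod (fun v =>
      if v + 1 = 10 then
        inc_helper (PySem.List.pySetD (PySem.List.pySetD lod pos (v + 1)) pos 0) (pos - 1) true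
      else PySem.List.pySetD lod pos (v + 1)) := by
  rw [inc_helper.eq_def]
  cases carry <;>
    · simp only [hpos, if_false, Bool.false_eq_true, ite_true]
      split <;> rename_i heq <;> simp [heq, is_ten, inc_helper_zero_false]

theorem findStop_zero (lod : List Int) : findStop lod 0 = some 0 := by
  rw [findStop.eq_def]; simp

theorem findStop_step (lod : List Int) (s : Int) (hs : s ≠ 0) :
    findStop lod s = (PySem.List.pyGet? lod s).elim none
      (fun v => if v = 9 then findStop lod (s - 1) else some s) := by
  rw [findStop.eq_def]
  simp only [hs, if_false]
  split <;> rename_i heq <;> simp [heq]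

theorem zeroRun_stop (lod : List Int) (k s : Int) (h : k ≤ s) : zeroRun lod k s = lod := by
  rw [zeroRun.eq_def]; simp [h]

theorem zeroRun_step (lod : List Int) (k s : Int) (h : s < k) :
    zeroRun lod k s = zeroRun (PySem.List.pySetD lod k 0) (k - 1) s := by
  rw [zeroRun.eq_def]; simp [not_le.mpr h]

-- a successful Python read means the index is in range
theorem inRange_of_some (lod : List Int) (s : Int) (w : Int)
    (hv : PySem.List.pyGet? lod s = some w) :
    -(lod.length : Int) ≤ s ∧ s < lod.length := by
  have : ¬ PySem.List.pyGet? lod s = none := by simp [hv]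
  rw [PySem.List.pyGet?_eq_none_iff] at this
  unfold PySem.Raise.InRange at this
  omega

-- setting the same Python index twice keeps only the second write
theorem pySetD_pySetD_self (xs : List Int) (i : Int) (a b : Int) :
    PySem.List.pySetD (PySem.List.pySetD xs i a) i b = PySem.List.pySetD xs i b := by
  simp [PySem.List.pySetD, PySem.List.pySet?, PySem.List.pyIdx?]
  split_ifs <;> simp_all <;> omega

-- reading strictly below a written index (in the same sign regime) is unchanged
theorem pyGet?_pySetD_lt (xs : List Int) (i k v : Int)
    (h : (0 < k ∧ k < i) ∨ (k < i ∧ i < 0)) :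
    PySem.List.pyGet? (PySem.List.pySetD xs i v) k = PySem.List.pyGet? xs k := by
  simp only [PySem.List.pyGet?, PySem.List.pySetD, PySem.List.pySet?, PySem.List.pyIdx?]
  split_ifs <;> simp_all <;>
    first
      | omega
      | · rw [List.getElem_set_ne (by omega)]
      | · rw [List.getElem?_set_ne (by omega)]

-- the scan never looks at indices ≥ its start, so a write at a higher index is invisible
theorem findStop_pySetD (xs : List Int) (i v : Int) (s : Int)
    (h : (0 ≤ s ∧ s < i) ∨ (s < i ∧ i < 0)) :
    findStop (PySem.List.pySetD xs i v) s = findStop xs s := by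
  have main : ∀ (n : Nat) (s : Int), (s + xs.length + 1).toNat ≤ n →
      ((0 ≤ s ∧ s < i) ∨ (s < i ∧ i < 0)) →
      findStop (PySem.List.pySetD xs i v) s = findStop xs s := by
    intro n
    induction n with
    | zero =>
      intro s hn hs
      have hs0 : s ≠ 0 := by omega
      have h1 : PySem.List.pyGet? xs s = none := by
        rw [PySem.List.pyGet?_eq_none_iff]; unfold PySem.Raise.InRange; omega
      rw [findStop_step _ _ hs0, findStop_step _ _ hs0,
          pyGet?_pySetD_lt xs i s v (by omega), h1]
      rfl
    | succ n ih =>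
      intro s hn hs
      by_cases hs0 : s = 0
      · subst hs0; rw [findStop_zero, findStop_zero]
      · rw [findStop_step _ _ hs0, findStop_step _ _ hs0,
            pyGet?_pySetD_lt xs i s v (by omega)]
        cases hv : PySem.List.pyGet? xs s with
        | none => rfl
        | some w =>
          have hr := inRange_of_some xs s w hv
          by_cases h9 : w = 9
          · simp only [Option.elim, h9, if_true]
            exact ih (s - 1) (by omega) (by omega)
          · simp [h9]
  exact main _ s le_rfl h

-- the scan only moves down
theorem findStop_le (lod : List Int) (s j : Int) (h : findStop lod s = some j) : j ≤ s := by
  have main : ∀ (n : Nat) (s j : Int), (s + lod.length + 1).toNat ≤ n →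
      findStop lod s = some j → j ≤ s := by
    intro n
    induction n with
    | zero =>
      intro s j hn hf
      have hs0 : s ≠ 0 := by omega
      have h1 : PySem.List.pyGet? lod s = none := by
        rw [PySem.List.pyGet?_eq_none_iff]; unfold PySem.Raise.InRange; omega
      rw [findStop_step _ _ hs0, h1] at hf
      simp at hf
    | succ n ih =>
      intro s j hn hf
      by_cases hs0 : s = 0
      · subst hs0; rw [findStop_zero] at hf; simp at hf; omega
      · rw [findStop_step _ _ hs0] at hf
        cases hv : PySem.List.pyGet? lod s with
        | none => rw [hv] at hf; simp at hf
        | some w =>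
          rw [hv] at hf
          have hr := inRange_of_some lod s w hv
          by_cases h9 : w = 9
          · simp only [Option.elim, h9, if_true] at hf
            have := ih (s - 1) j (by omega) hf
            omega
          · simp [h9] at hf; omega
  exact main _ s j le_rfl h

-- A's carry recursion computes exactly B's scan-then-zero-then-bump result
theorem inc_helper_eq_phases (lod : List Int) (pos : Int) (carry : Bool) (j : Int)
    (hc : pos = 0 → carry = true)
    (hf : findStop lod pos = some j) :
    inc_helper lod pos carry = bumpAt (zeroRun lod pos j) j := by
  have main : ∀ (n : Nat) (lod : List Int) (pos : Int) (carry : Bool) (j : Int),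
      (pos + lod.length + 1).toNat ≤ n → (pos = 0 → carry = true) →
      findStop lod pos = some j →
      inc_helper lod pos carry = bumpAt (zeroRun lod pos j) j := by
    intro n
    induction n with
    | zero =>
      intro lod pos carry j hn hc hf
      have hs0 : pos ≠ 0 := by omega
      have h1 : PySem.List.pyGet? lod pos = none := by
        rw [PySem.List.pyGet?_eq_none_iff]; unfold PySem.Raise.InRange; omega
      rw [findStop_step _ _ hs0, h1] at hf
      simp at hf
    | succ n ih =>
      intro lod pos carry j hn hc hf
      by_cases hs0 : pos = 0
      · subst hs0
        rw [findStop_zero] at hf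
        simp only [Option.some.injEq] at hf
        subst hf
        rw [hc rfl, inc_helper_zero_true, zeroRun_stop _ _ _ le_rfl]
      · rw [inc_helper_pos lod pos carry hs0]
        rw [findStop_step _ _ hs0] at hf
        cases hv : PySem.List.pyGet? lod pos with
        | none => rw [hv] at hf; simp at hf
        | some v =>
          rw [hv] at hf
          have hr := inRange_of_some lod pos v hv
          by_cases h9 : v = 9
          · simp only [Option.elim, h9, if_true] at hf
            simp only [Option.elim, h9]
            norm_num
            rw [pySetD_pySetD_self]
            have hf2 : findStop (PySem.List.pySetD lod pos 0) (pos - 1) = some j := by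
              rw [findStop_pySetD lod pos 0 (pos - 1) (by omega)]; exact hf
            have hle : j ≤ pos - 1 := findStop_le _ _ _ hf
            rw [ih (PySem.List.pySetD lod pos 0) (pos - 1) true j
                  (by simp only [PySem.List.length_pySetD]; omega) (by simp) hf2]
            rw [zeroRun_step lod pos j (by omega)]
          · simp only [Option.elim, h9, if_false, Option.some.injEq] at hf
            subst hf
            have h10 : ¬ (v + 1 = 10) := by omega
            simp only [Option.elim, h10, if_false]
            rw [zeroRun_stop _ _ _ le_rfl, bumpAt, hv]
  exact main _ lod pos carry j le_rfl hc hf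

-- on Pre_ the scan always succeeds
theorem findStop_some_of_pre (lod : List Int) (pos : Int)
    (h1 : 0 ≤ pos → pos < lod.length)
    (h2 : pos < 0 → -(lod.length : Int) ≤ pos ∧
      ∃ d ∈ lod.take ((lod.length : Int) + pos + 1).toNat, d ≠ 9) :
    (findStop lod pos).isSome := by
  have main : ∀ (n : Nat) (pos : Int), (pos + lod.length + 1).toNat ≤ n →
      (0 ≤ pos → pos < lod.length) →
      (pos < 0 → -(lod.length : Int) ≤ pos ∧
        ∃ d ∈ lod.take ((lod.length : Int) + pos + 1).toNat, d ≠ 9) →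
      (findStop lod pos).isSome := by
    intro n
    induction n with
    | zero =>
      intro pos hn h1 h2
      exfalso
      have hlen : (0:Int) ≤ lod.length := by positivity
      rcases lt_or_ge pos 0 with h | h
      · have := (h2 h).1; omega
      · have := h1 h; omega
    | succ n ih =>
      intro pos hn h1 h2
      by_cases hs0 : pos = 0
      · subst hs0; rw [findStop_zero]; rfl
      · rw [findStop_step _ _ hs0]
        rcases lt_or_ge pos 0 with hneg | hpos
        · obtain ⟨hge, d, hd, hd9⟩ := h2 hneg
          -- the read lod[pos] hits normalized index (lod.length + pos).toNat
          obtain ⟨k, hk⟩ : ∃ k : Nat, pos = -(k : Int) := ⟨(-pos).toNat, by omega⟩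
          subst hk
          have hk1 : 0 < k := by omega
          have hk2 : k ≤ lod.length := by omega
          rw [PySem.List.pyGet?_neg_natCast lod k hk1 hk2]
          have hidx : lod.length - k < lod.length := by omega
          rw [List.getElem?_eq_getElem hidx]
          by_cases h9 : lod[lod.length - k] = 9
          · simp only [Option.elim, h9, if_true]
            apply ih _ (by omega)
            · intro h; omega
            · intro _
              by_cases hbot : k = lod.length
              · -- pos = -len: the take-1 witness is lod[0] ≠ 9, but the read was lod[0] = 9
                exfalso
                have h0 : ((lod.length : Int) + -(k:Int) + 1).toNat = 1 := by omega
                have hlen0 : (0:Nat) < lod.length := by omega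
                have ht1 : lod.take 1 = [lod[0]] := by
                  simp [List.take_add_one, List.getElem?_eq_getElem hlen0]
                rw [h0, ht1] at hd
                simp only [List.mem_singleton] at hd
                have heq : lod[0]'hlen0 = lod[lod.length - k]'hidx := by congr 1; omega
                exact hd9 (hd.trans (heq.trans h9))
              · constructor
                · omega
                · -- drop the last element (= 9) of the old take to get the new witness
                  have hm : ((lod.length : Int) + -(k:Int) + 1).toNat
                      = ((lod.length : Int) + (-(k:Int) - 1) + 1).toNat + 1 := by omega
                  rw [hm, List.take_add_one] at hd
                  simp only [List.mem_append] at hd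
                  rcases hd with hd | hd
                  · exact ⟨d, hd, hd9⟩
                  · exfalso
                    have hlt : ((lod.length : Int) + (-(k:Int) - 1) + 1).toNat < lod.length := by omega
                    rw [List.getElem?_eq_getElem hlt] at hd
                    simp only [Option.toList_some, List.mem_singleton] at hd
                    have heq : lod[((lod.length : Int) + (-(k:Int) - 1) + 1).toNat]'hlt
                        = lod[lod.length - k]'hidx := by congr 1; omega
                    exact hd9 (hd.trans (heq.trans h9))
          · simp [h9]
        · have hlt : pos < lod.length := h1 hpos
          rw [PySem.List.pyGet?_of_nonneg lod hpos,
              List.getElem?_eq_getElem (by omega : pos.toNat < lod.length)]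
          by_cases h9 : lod[pos.toNat] = 9
          · simp only [Option.elim, h9, if_true]
            apply ih _ (by omega)
            · intro _; omega
            · intro h; omega
          · simp [h9]
  exact main _ pos le_rfl h1 h2

-- ===== VERDICT (by name: the statement is the Claim_ definition above) =====
theorem inc_helper_spec : Claim_equal_inc_helper := by
  intro lod pos carry _ hpre
  obtain ⟨p0, p1, p2⟩ := hpre
  unfold Spec_inc_helper
  by_cases hs0 : pos = 0
  · subst hs0
    cases carry with
    | false => rw [inc_helper_zero_false]; simp [inc_helper_alt]
    | true => rw [inc_helper_zero_true]; simp [inc_helper_alt]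
  · have hsome := findStop_some_of_pre lod pos (fun h => p1 (by omega)) p2
    obtain ⟨j, hj⟩ := Option.isSome_iff_exists.mp hsome
    rw [inc_helper_eq_phases lod pos carry j (fun h => absurd h hs0) hj]
    simp [inc_helper_alt, hs0, hj]
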